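-- pv_equiv track=rewrite | github.com/danino18/ee_planer | files/build_v6.py | infer_tracks
-- ===== SOURCE A (Python) =====
-- from typing import Any, Dict, List, Optional, Tuple
--
-- TRACK_PAGE_RANGES = {
--     "המסלול להנדסת חשמל":                             (3,  7),
--     "המסלול להנדסת חשמל ומתמטיקה":                    (8,  11),
--     "המסלול להנדסת מחשבים ותוכנה":                    (11, 13),
--     "המסלול להנדסת חשמל ופיזיקה":                     (14, 17),
--     "מסלול משולב לתואר מוסמך למדעים בהנדסת חשמל ובפיזיקה": (17, 20),
--     "המסלול להנדסת מחשבים":                           (21, 24),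
--     "מבנה הלימודים בתוכנית למצטיינים בדגש מחקרי":     (24, 24),
--     "תכנית התמחות משנה בין פקולטית ברובוטיקה":        (24, 24),
-- }
--
-- def infer_tracks(pages: List[int]) -> List[str]:
--     """
--     Returns all tracks that have maximal page overlap with this table's pages.
--     Usually returns one track, but returns multiple when a table sits exactly on
--     a track boundary (e.g., page 11 is the last page of 'חשמל ומתמטיקה' and
--     the first page of 'מחשבים ותוכנה').  In that case we duplicate the records
--     so both tracks get the shared semesters.
--     """
--     pset = set(pages)
--     scored: List[Tuple[int, str]] = []
--     for track, (s, e) in TRACK_PAGE_RANGES.items():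
--         overlap = len(pset & set(range(s, e + 1)))
--         if overlap > 0:
--             scored.append((overlap, track))
--     if not scored:
--         return [list(TRACK_PAGE_RANGES.keys())[0]]   # fallback: first track
--     best_overlap = max(o for o, _ in scored)
--     return [t for o, t in scored if o == best_overlap]
-- ===== SOURCE B (Python) =====
-- from typing import Any, Dict, List, Optional, Tuple
--
-- TRACK_PAGE_RANGES = {
--     "המסלול להנדסת חשמל":                             (3,  7),
--     "המסלול להנדסת חשמל ומתמטיקה":                    (8,  11),
--     "המסלול להנדסת מחשבים ותוכנה":                    (11, 13),
--     "המסלול להנדסת חשמל ופיזיקה":                     (14, 17),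
--     "מסלול משולב לתואר מוסמך למדעים בהנדסת חשמל ובפיזיקה": (17, 20),
--     "המסלול להנדסת מחשבים":                           (21, 24),
--     "מבנה הלימודים בתוכנית למצטיינים בדגש מחקרי":     (24, 24),
--     "תכנית התמחות משנה בין פקולטית ברובוטיקה":        (24, 24),
-- }
--
-- # Inverted index built once: page number -> list of tracks whose range covers it.
-- _PAGE_TO_TRACKS: Dict[int, List[str]] = {}
-- for _t, (_s, _e) in TRACK_PAGE_RANGES.items():
--     for _p in range(_s, _e + 1):
--         _PAGE_TO_TRACKS.setdefault(_p, []).append(_t)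
--
-- def infer_tracks(pages: List[int]) -> List[str]:
--     counts: Dict[str, int] = {}
--     for p in set(pages):
--         for t in _PAGE_TO_TRACKS.get(p, []):
--             counts[t] = counts.get(t, 0) + 1
--     if not counts:
--         return [next(iter(TRACK_PAGE_RANGES))]
--     best = max(counts.values())
--     return [t for t in TRACK_PAGE_RANGES if counts.get(t, 0) == best]
-- ===== Notes on version B (the rewrite author's own statement) =====
-- stated objective: alternative
-- what changed: A scans every track's page range against the page set, collects (overlap, track) scores, then takes the max and filters; B inverts the data: a page->tracks index is built once from the ranges, a single pass over the page set increments a per-track counter via index lookups (no range scan per track), and the winners are read off the counter in TRACK_PAGE_RANGES order.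
import Mathlib
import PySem

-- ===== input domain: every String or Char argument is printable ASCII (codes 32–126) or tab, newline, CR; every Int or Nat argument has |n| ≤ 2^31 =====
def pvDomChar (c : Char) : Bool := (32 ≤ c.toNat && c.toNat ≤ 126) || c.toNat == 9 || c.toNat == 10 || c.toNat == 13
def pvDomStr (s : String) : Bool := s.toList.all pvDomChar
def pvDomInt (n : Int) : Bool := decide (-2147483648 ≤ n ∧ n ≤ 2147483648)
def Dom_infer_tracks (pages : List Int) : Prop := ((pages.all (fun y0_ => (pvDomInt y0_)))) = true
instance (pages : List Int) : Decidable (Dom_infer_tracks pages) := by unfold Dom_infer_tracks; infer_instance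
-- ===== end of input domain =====

-- B inverts A's data layout: instead of scanning each track's page range against the page set,
-- it builds a page→tracks index once and counts per-track hits in one pass over the page set
-- (objective: alternative algorithm; same result, including tie order and the no-overlap fallback).

-- ===== PORT A =====
def trackPageRanges : List (String × Int × Int) :=
  [("המסלול להנדסת חשמל", 3, 7),
   ("המסלול להנדסת חשמל ומתמטיקה", 8, 11),
   ("המסלול להנדסת מחשבים ותוכנה", 11, 13),
   ("המסלול להנדסת חשמל ופיזיקה", 14, 17),
   ("מסלול משולב לתואר מוסמך למדעים בהנדסת חשמל ובפיזיקה", 17, 20),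
   ("המסלול להנדסת מחשבים", 21, 24),
   ("מבנה הלימודים בתוכנית למצטיינים בדגש מחקרי", 24, 24),
   ("תכנית התמחות משנה בין פקולטית ברובוטיקה", 24, 24)]

def infer_tracks (pages : List Int) : List String :=
  let pset : PySem.Set Int := PySem.Set.ofList pages
  let scored : List (Int × String) :=
    trackPageRanges.foldl
      (fun acc te =>
        let overlap : Int :=
          PySem.Set.len (PySem.Set.inter pset
            (PySem.Set.ofList (PySem.List.pyRange te.2.1 (te.2.2 + 1) 1)))
        if 0 < overlap then acc ++ [(overlap, te.1)] else acc)
      []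
  if scored.isEmpty then
    [(trackPageRanges.map (fun te => te.1)).headD ""]
  else
    match PySem.List.max? (scored.map Prod.fst) id with
    | none => []   -- unreachable: scored is nonempty
    | some best => (scored.filter (fun ot => ot.1 == best)).map Prod.snd

-- ===== PORT B =====
-- Source B's module-level build of _PAGE_TO_TRACKS; setdefault(p, []).append(t) updates key p in
-- place to the extended list, which is exactly Dict.insert (overwrite keeps the key's position)
def pageToTracks : PySem.Dict Int (List String) :=
  trackPageRanges.foldl
    (fun d te =>
      (PySem.List.pyRange te.2.1 (te.2.2 + 1) 1).foldl
        (fun d p => d.insert p (d.getD p [] ++ [te.1])) d)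
    PySem.Dict.empty

def infer_tracks_alt (pages : List Int) : List String :=
  let counts : PySem.Dict String Int :=
    (PySem.Set.ofList pages).foldl
      (fun c p =>
        (pageToTracks.getD p []).foldl
          (fun c t => c.insert t (c.getD t 0 + 1)) c)
      PySem.Dict.empty
  if counts.size == 0 then
    [(trackPageRanges.headD ("", 0, 0)).1]
  else
    match PySem.List.max? counts.values id with
    | none => []   -- unreachable: counts is nonempty
    | some best =>
        (trackPageRanges.filter (fun te => counts.getD te.1 0 == best)).map (fun te => te.1)

-- ===== PRECONDITION & SPEC =====
def Spec_infer_tracks (pages : List Int) (out : List String) : Prop := out = infer_tracks_alt pages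
instance (pages : List Int) (out : List String) : Decidable (Spec_infer_tracks pages out) := by unfold Spec_infer_tracks; infer_instance

-- ===== CLAIM (what is proved, stated in full; the proofs are below) =====
def Claim_equal_infer_tracks : Prop := ∀ (pages : List Int), Dom_infer_tracks pages → Spec_infer_tracks pages (infer_tracks pages)

-- ===== LEMMAS AND PROOFS =====

-- the overlap of the page set with [s, e], as A's port computes it, is a countP over the set
theorem pvOverlap_eq (pset : List Int) (s e : Int) :
    PySem.Set.len (PySem.Set.inter pset
      (PySem.Set.ofList (PySem.List.pyRange s (e + 1) 1))) =
    ((pset.countP (fun p => decide (s ≤ p ∧ p ≤ e)) : Nat) : Int) := by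
  unfold PySem.Set.len PySem.Set.inter
  rw [← List.countP_eq_length_filter]
  congr 1
  apply List.countP_congr
  intro x _
  have h : (PySem.Set.ofList (PySem.List.pyRange s (e + 1) 1)).contains x =
      decide (s ≤ x ∧ x ≤ e) := by
    rw [PySem.Set.contains, List.contains_eq_mem]
    simp only [PySem.Set.mem_ofList, PySem.List.mem_pyRange_one, decide_eq_decide]
    omega
  rw [h]

-- pageToTracks evaluated once (kernel-checked literal used by the pointwise lemmas below)
set_option maxHeartbeats 8000000 in
theorem pvPT_lit : pageToTracks = PySem.Dict.mk
    [((3:Int), ["המסלול להנדסת חשמל"]), (4, ["המסלול להנדסת חשמל"]), (5, ["המסלול להנדסת חשמל"]),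
     (6, ["המסלול להנדסת חשמל"]), (7, ["המסלול להנדסת חשמל"]),
     (8, ["המסלול להנדסת חשמל ומתמטיקה"]), (9, ["המסלול להנדסת חשמל ומתמטיקה"]),
     (10, ["המסלול להנדסת חשמל ומתמטיקה"]),
     (11, ["המסלול להנדסת חשמל ומתמטיקה", "המסלול להנדסת מחשבים ותוכנה"]),
     (12, ["המסלול להנדסת מחשבים ותוכנה"]), (13, ["המסלול להנדסת מחשבים ותוכנה"]),
     (14, ["המסלול להנדסת חשמל ופיזיקה"]), (15, ["המסלול להנדסת חשמל ופיזיקה"]),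
     (16, ["המסלול להנדסת חשמל ופיזיקה"]),
     (17, ["המסלול להנדסת חשמל ופיזיקה", "מסלול משולב לתואר מוסמך למדעים בהנדסת חשמל ובפיזיקה"]),
     (18, ["מסלול משולב לתואר מוסמך למדעים בהנדסת חשמל ובפיזיקה"]),
     (19, ["מסלול משולב לתואר מוסמך למדעים בהנדסת חשמל ובפיזיקה"]),
     (20, ["מסלול משולב לתואר מוסמך למדעים בהנדסת חשמל ובפיזיקה"]),
     (21, ["המסלול להנדסת מחשבים"]), (22, ["המסלול להנדסת מחשבים"]), (23, ["המסלול להנדסת מחשבים"]),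
     (24, ["המסלול להנדסת מחשבים", "מבנה הלימודים בתוכנית למצטיינים בדגש מחקרי",
           "תכנית התמחות משנה בין פקולטית ברובוטיקה"])] := by decide

set_option maxHeartbeats 4000000 in
theorem pvLookup_out (p : Int) (h : ¬(3 ≤ p ∧ p ≤ 24)) : pageToTracks.getD p [] = [] := by
  apply PySem.Dict.getD_of_get?_eq_none
  rw [PySem.Dict.get?_eq_none_iff_not_mem_keys, pvPT_lit]
  intro hmem
  simp at hmem
  omega

-- each track occurs in the index's list for p exactly when p lies in its range
set_option maxHeartbeats 4000000 in
theorem pvLookup_count (te : String × Int × Int) (hte : te ∈ trackPageRanges) (p : Int) :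
    (pageToTracks.getD p []).count te.1 = if te.2.1 ≤ p ∧ p ≤ te.2.2 then 1 else 0 := by
  by_cases hp : 3 ≤ p ∧ p ≤ 24
  · obtain ⟨h1, h2⟩ := hp
    rw [pvPT_lit]
    fin_cases hte <;> (interval_cases p <;> decide)
  · rw [pvLookup_out p hp]
    fin_cases hte <;> (dsimp only; rw [if_neg (by omega)]; simp)

-- every name in the index is a track name
set_option maxHeartbeats 4000000 in
theorem pvLookup_names (p : Int) (t : String) (ht : t ∈ pageToTracks.getD p []) :
    ∃ te ∈ trackPageRanges, te.1 = t := by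
  by_cases hp : 3 ≤ p ∧ p ≤ 24
  · obtain ⟨h1, h2⟩ := hp
    have hsub : pageToTracks.getD p [] ⊆ trackPageRanges.map (fun te => te.1) := by
      rw [pvPT_lit]
      interval_cases p <;> decide
    have := hsub ht
    rw [List.mem_map] at this
    exact this
  · rw [pvLookup_out p hp] at ht
    exact absurd ht (List.not_mem_nil)

-- B's counter loop body, named for the inductions
def pvCStep (c : PySem.Dict String Int) (p : Int) : PySem.Dict String Int :=
  (pageToTracks.getD p []).foldl (fun c t => c.insert t (c.getD t 0 + 1)) c

theorem pvCounts_getD (l : List Int) (d : PySem.Dict String Int) (t : String) :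
    (l.foldl pvCStep d).getD t 0 =
      d.getD t 0 + (l.map (fun p => ((pageToTracks.getD p []).count t : Int))).sum := by
  induction l generalizing d with
  | nil => simp
  | cons p l ih =>
      rw [List.foldl_cons, ih]
      have h : (pvCStep d p).getD t 0 = d.getD t 0 + ((pageToTracks.getD p []).count t : Int) := by
        simp only [pvCStep]
        exact PySem.Dict.getD_foldl_insert_add_one _ _ _
      rw [h, List.map_cons, List.sum_cons]
      ring

theorem pvCounts_keys (l : List Int) (d : PySem.Dict String Int) :
    (l.foldl pvCStep d).keys =
      PySem.Set.update d.keys (l.flatMap (fun p => pageToTracks.getD p [])) := by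
  induction l generalizing d with
  | nil => simp [PySem.Set.update]
  | cons p l ih =>
      rw [List.foldl_cons, ih, List.flatMap_cons]
      have h : (pvCStep d p).keys = PySem.Set.update d.keys (pageToTracks.getD p []) := by
        simp only [pvCStep]
        exact PySem.Dict.keys_foldl_insert _ _ _
      rw [h]
      simp [PySem.Set.update, List.foldl_append]

theorem pvCounts_nodup (l : List Int) (d : PySem.Dict String Int) (h : d.keys.Nodup) :
    (l.foldl pvCStep d).keys.Nodup := by
  induction l generalizing d with
  | nil => exact h
  | cons p l ih =>
      rw [List.foldl_cons]
      apply ih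
      simp only [pvCStep]
      exact PySem.Dict.nodup_keys_foldl_insert _ _ _ h

-- ===== VERDICT (by name: the statement is the Claim_ definition above) =====
theorem infer_tracks_spec : Claim_equal_infer_tracks := by
  intro pages _
  unfold Spec_infer_tracks infer_tracks infer_tracks_alt
  dsimp only
  set L : List Int := PySem.Set.ofList pages with hLdef
  set cnt : String × Int × Int → Int :=
    fun te => ((L.countP (fun p => decide (te.2.1 ≤ p ∧ p ≤ te.2.2)) : Nat) : Int) with hcnt
  -- A's loop is an append-if fold: rewrite its body via the countP form of the overlap
  have hAfun : (fun (acc : List (Int × String)) (te : String × Int × Int) =>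
      if 0 < PySem.Set.len (PySem.Set.inter L
          (PySem.Set.ofList (PySem.List.pyRange te.2.1 (te.2.2 + 1) 1))) then
        acc ++ [(PySem.Set.len (PySem.Set.inter L
          (PySem.Set.ofList (PySem.List.pyRange te.2.1 (te.2.2 + 1) 1))), te.1)]
      else acc) =
      (fun acc te => if 0 < cnt te then acc ++ [(cnt te, te.1)] else acc) := by
    funext acc te
    simp only [pvOverlap_eq, hcnt]
  rw [hAfun, PySem.List.foldl_append_ite (p := fun te => 0 < cnt te)
    (f := fun te => (cnt te, te.1)), List.nil_append]
  -- B's loop is pvCStep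
  have hBfun : (fun (c : PySem.Dict String Int) (p : Int) =>
      (pageToTracks.getD p []).foldl (fun c t => c.insert t (c.getD t 0 + 1)) c) = pvCStep := by
    funext c p
    rfl
  rw [hBfun]
  set counts : PySem.Dict String Int := L.foldl pvCStep PySem.Dict.empty with hcounts
  -- counter facts
  have hgetD : ∀ t : String, counts.getD t 0 =
      (L.map (fun p => ((pageToTracks.getD p []).count t : Int))).sum := by
    intro t
    rw [hcounts, pvCounts_getD, PySem.Dict.getD_empty]
    ring
  have htrack : ∀ te ∈ trackPageRanges, counts.getD te.1 0 = cnt te := by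
    intro te hte
    rw [hgetD te.1]
    have hmapeq : L.map (fun p => ((pageToTracks.getD p []).count te.1 : Int)) =
        L.map (fun p => if (fun p => decide (te.2.1 ≤ p ∧ p ≤ te.2.2)) p = true then (1 : Int) else 0) := by
      apply List.map_congr_left
      intro p _
      rw [pvLookup_count te hte p]
      by_cases h : te.2.1 ≤ p ∧ p ≤ te.2.2
      · rw [if_pos h, if_pos (show (fun p => decide (te.2.1 ≤ p ∧ p ≤ te.2.2)) p = true by
          simpa using h)]
        simp
      · rw [if_neg h, if_neg (show ¬ (fun p => decide (te.2.1 ≤ p ∧ p ≤ te.2.2)) p = true by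
          simpa using h)]
        simp
    rw [hmapeq, PySem.List.sum_map_ite_one_zero]
  have hkeys : counts.keys = PySem.Set.ofList (L.flatMap (fun p => pageToTracks.getD p [])) := by
    rw [hcounts, pvCounts_keys, PySem.Dict.keys_empty, PySem.Set.ofList_eq_foldl]
    rfl
  have hmemk : ∀ k : String, k ∈ counts.keys ↔ ∃ p ∈ L, k ∈ pageToTracks.getD p [] := by
    intro k
    rw [hkeys, PySem.Set.mem_ofList, List.mem_flatMap]
  have hnodup : counts.keys.Nodup := pvCounts_nodup _ _ PySem.Dict.nodup_keys_empty
  have hsize : counts.size = counts.keys.length := by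
    simp [PySem.Dict.size, PySem.Dict.keys]
  -- a positive track count yields a witness key, and conversely
  have hkey_of_pos : ∀ te ∈ trackPageRanges, 0 < cnt te → te.1 ∈ counts.keys := by
    intro te hte hpos
    simp only [hcnt] at hpos
    have hcp : 0 < L.countP (fun p => decide (te.2.1 ≤ p ∧ p ≤ te.2.2)) := by omega
    rw [List.countP_pos_iff] at hcp
    obtain ⟨p, hpL, hpr⟩ := hcp
    rw [hmemk]
    refine ⟨p, hpL, ?_⟩
    rw [← List.count_pos_iff, pvLookup_count te hte p, if_pos (by simpa using hpr)]
    omega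
  have hpos_of_key : ∀ k ∈ counts.keys, ∃ te ∈ trackPageRanges, te.1 = k ∧ 0 < cnt te := by
    intro k hk
    rw [hmemk] at hk
    obtain ⟨p, hpL, hpmem⟩ := hk
    obtain ⟨te, hte, hname⟩ := pvLookup_names p k hpmem
    refine ⟨te, hte, hname, ?_⟩
    have hcount : 0 < (pageToTracks.getD p []).count te.1 := by
      rw [List.count_pos_iff, hname]
      exact hpmem
    rw [pvLookup_count te hte p] at hcount
    by_cases hr : te.2.1 ≤ p ∧ p ≤ te.2.2
    · simp only [hcnt]
      have : 0 < L.countP (fun p => decide (te.2.1 ≤ p ∧ p ≤ te.2.2)) := by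
        rw [List.countP_pos_iff]
        exact ⟨p, hpL, by simpa using hr⟩
      omega
    · rw [if_neg hr] at hcount
      omega
  by_cases hpos : ∃ te ∈ trackPageRanges, 0 < cnt te
  · -- some track overlaps: both branches go through the max
    obtain ⟨te0, hte0, hte0pos⟩ := hpos
    have hfil : te0 ∈ trackPageRanges.filter (fun te => decide (0 < cnt te)) :=
      List.mem_filter.mpr ⟨hte0, by simpa using hte0pos⟩
    have hsne : (trackPageRanges.filter (fun te => decide (0 < cnt te))).map
        (fun te => (cnt te, te.1)) ≠ [] := by
      intro hc
      rw [List.map_eq_nil_iff] at hc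
      rw [hc] at hfil
      exact List.not_mem_nil hfil
    have hEb : ((trackPageRanges.filter (fun te => decide (0 < cnt te))).map
        (fun te => (cnt te, te.1))).isEmpty = false := by
      simpa [List.isEmpty_iff] using hsne
    -- A's max
    obtain ⟨M, hM⟩ : ∃ M, PySem.List.max? (((trackPageRanges.filter
        (fun te => decide (0 < cnt te))).map (fun te => (cnt te, te.1))).map Prod.fst) id = some M := by
      cases hm : PySem.List.max? (((trackPageRanges.filter
          (fun te => decide (0 < cnt te))).map (fun te => (cnt te, te.1))).map Prod.fst) id with
      | none =>
          rw [PySem.List.max?_eq_none_iff, List.map_eq_nil_iff] at hm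
          exact absurd hm hsne
      | some m => exact ⟨m, rfl⟩
    have hMmem := PySem.List.max?_mem hM
    rw [List.mem_map] at hMmem
    obtain ⟨oM, hoM, hoMfst⟩ := hMmem
    rw [List.mem_map] at hoM
    obtain ⟨teM, hteMfil, hteMo⟩ := hoM
    have hteM : teM ∈ trackPageRanges := (List.mem_filter.mp hteMfil).1
    have hteMpos : 0 < cnt teM := by
      have := (List.mem_filter.mp hteMfil).2
      simpa using this
    have hMcnt : cnt teM = M := by rw [← hoMfst, ← hteMo]
    have hMpos : 0 < M := hMcnt ▸ hteMpos
    have hMub : ∀ te ∈ trackPageRanges, cnt te ≤ M := by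
      intro te hte
      by_cases h : 0 < cnt te
      · have hmem : cnt te ∈ ((trackPageRanges.filter (fun te => decide (0 < cnt te))).map
            (fun te => (cnt te, te.1))).map Prod.fst := by
          rw [List.map_map]
          exact List.mem_map.mpr ⟨te, List.mem_filter.mpr ⟨hte, by simpa using h⟩, rfl⟩
        exact PySem.List.max?_isMax hM _ hmem
      · omega
    -- B's side: counts is nonempty and its max is M
    have hkne : counts.keys ≠ [] := by
      intro hc
      have := hkey_of_pos teM hteM hteMpos
      rw [hc] at this
      exact List.not_mem_nil this
    have hszne : (counts.size == 0) = false := by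
      rw [hsize]
      simpa using fun h => hkne (List.length_eq_zero_iff.mp h)
    have hvals : counts.values = counts.keys.map (fun k => counts.getD k 0) :=
      PySem.Dict.values_eq_map_keys counts hnodup 0
    obtain ⟨M', hM'⟩ : ∃ M', PySem.List.max? counts.values id = some M' := by
      cases hm : PySem.List.max? counts.values id with
      | none =>
          rw [PySem.List.max?_eq_none_iff, hvals, List.map_eq_nil_iff] at hm
          exact absurd hm hkne
      | some m => exact ⟨m, rfl⟩
    have hM'M : M' = M := by
      have hup : M' ≤ M := by
        have hmem := PySem.List.max?_mem hM'
        rw [hvals, List.mem_map] at hmem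
        obtain ⟨k, hk, hkv⟩ := hmem
        obtain ⟨te, hte, hname, _⟩ := hpos_of_key k hk
        rw [← hkv, ← hname, htrack te hte]
        exact hMub te hte
      have hlo : M ≤ M' := by
        have hmem : M ∈ counts.values := by
          rw [hvals]
          exact List.mem_map.mpr ⟨teM.1, hkey_of_pos teM hteM hteMpos,
            by rw [htrack teM hteM, hMcnt]⟩
        exact PySem.List.max?_isMax hM' _ hmem
      omega
    rw [hM'M] at hM'
    simp only [hEb, Bool.false_eq_true, if_false, hszne, hM, hM']
    -- the two result lists coincide
    rw [List.filter_map, List.map_map, List.filter_filter]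
    apply congrArg
    apply List.filter_congr
    intro te hte
    rw [htrack te hte]
    by_cases h : cnt te = M
    · simp [h, Function.comp]
      omega
    · simp [h, Function.comp]
  · -- no track overlaps: A's scored list and B's counter are both empty
    simp only [not_exists, not_and, not_lt] at hpos
    have hfil : trackPageRanges.filter (fun te => decide (0 < cnt te)) = [] := by
      rw [List.filter_eq_nil_iff]
      intro te hte
      have := hpos te hte
      simp only [decide_eq_true_eq, not_lt]
      omega
    have hkeysnil : counts.keys = [] := by
      by_contra hc
      obtain ⟨k, hk⟩ := List.exists_mem_of_ne_nil _ hc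
      obtain ⟨te, hte, _, hp⟩ := hpos_of_key k hk
      have := hpos te hte
      omega
    have hsz : (counts.size == 0) = true := by
      rw [hsize, hkeysnil]
      rfl
    simp only [hfil, List.map_nil, List.isEmpty_nil, if_true, hsz]
    rfl
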